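-- pv_equiv track=rewrite | github.com/tonyperkins/homeassistant-broadlink-manager-v2 | app/entity_detector.py | _is_valid_entity
-- ===== SOURCE A (Python) =====
-- from typing import Dict, List, Tuple, Optional, Any
--
-- def _is_valid_entity(entity_type: str, command_roles: Dict[str, str]) -> bool:
--     """
--     Check if the detected entity has the minimum required commands
--
--     Args:
--         entity_type: Type of entity
--         command_roles: Dict of detected command roles
--
--     Returns:
--         True if entity is valid
--     """
--     if entity_type == 'light':
--         # Light needs either on/off or toggle
--         has_on_off = 'turn_on' in command_roles and 'turn_off' in command_roles
--         has_toggle = 'toggle' in command_roles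
--         return has_on_off or has_toggle
--
--     elif entity_type == 'fan':
--         # Fan needs at least off command or speed commands
--         has_off = 'turn_off' in command_roles
--         has_speeds = any(role.startswith('speed') for role in command_roles)
--         return has_off or has_speeds
--
--     elif entity_type == 'switch':
--         # Switch needs on/off or toggle
--         has_on_off = 'turn_on' in command_roles and 'turn_off' in command_roles
--         has_toggle = 'toggle' in command_roles
--         return has_on_off or has_toggle
--
--     elif entity_type == 'media_player':
--         # Media player needs at least power or volume control
--         has_power = 'power' in command_roles or ('turn_on' in command_roles and 'turn_off' in command_roles)
--         has_volume = 'volume_up' in command_roles or 'volume_down' in command_roles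
--         return has_power or has_volume
--
--     elif entity_type == 'climate':
--         # Climate needs at least on/off or temperature control or hvac modes
--         has_on_off = 'turn_on' in command_roles and 'turn_off' in command_roles
--         has_temps = any(role.startswith('temperature_') for role in command_roles)
--         has_temp_control = 'temperature_up' in command_roles or 'temperature_down' in command_roles
--         has_hvac_modes = any(role.startswith('hvac_mode_') for role in command_roles)
--         return has_on_off or has_temps or has_temp_control or has_hvac_modes
--
--     elif entity_type == 'cover':
--         # Cover needs at least open/close or stop
--         has_open = 'open' in command_roles
--         has_close = 'close' in command_roles
--         has_stop = 'stop' in command_roles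
--         has_positions = any(role.startswith('position_') for role in command_roles)
--         return has_open or has_close or has_stop or has_positions
--
--     return False
-- ===== SOURCE B (Python) =====
-- from typing import Dict, List, Tuple
--
-- # Validity rules as data: for each entity type, a list of alternatives (DNF);
-- # an alternative is a list of requirements that must all hold. A requirement
-- # is ('key', k) -- k is a command role -- or ('prefix', p) -- some role starts with p.
-- _RULES: Dict[str, List[List[Tuple[str, str]]]] = {
--     'light': [[('key', 'turn_on'), ('key', 'turn_off')], [('key', 'toggle')]],
--     'switch': [[('key', 'turn_on'), ('key', 'turn_off')], [('key', 'toggle')]],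
--     'fan': [[('key', 'turn_off')], [('prefix', 'speed')]],
--     'media_player': [[('key', 'power')],
--                      [('key', 'turn_on'), ('key', 'turn_off')],
--                      [('key', 'volume_up')], [('key', 'volume_down')]],
--     'climate': [[('key', 'turn_on'), ('key', 'turn_off')],
--                 [('prefix', 'temperature_')],
--                 [('key', 'temperature_up')], [('key', 'temperature_down')],
--                 [('prefix', 'hvac_mode_')]],
--     'cover': [[('key', 'open')], [('key', 'close')], [('key', 'stop')],
--               [('prefix', 'position_')]],
-- }
--
--
-- def _holds(req: Tuple[str, str], command_roles: Dict[str, str]) -> bool: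
--     kind, s = req
--     if kind == 'key':
--         return s in command_roles
--     return any(role.startswith(s) for role in command_roles)
--
--
-- def _is_valid_entity(entity_type: str, command_roles: Dict[str, str]) -> bool:
--     alternatives = _RULES.get(entity_type, [])
--     return any(all(_holds(req, command_roles) for req in alt)
--                for alt in alternatives)
-- ===== Notes on version B (the rewrite author's own statement) =====
-- stated objective: alternative
-- what changed: Replaces the hardcoded if/elif chain of boolean expressions with a declarative rules table in DNF (per type, a list of alternatives, each a list of key/prefix requirements) evaluated by one generic any/all interpreter loop.
import Mathlib
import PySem

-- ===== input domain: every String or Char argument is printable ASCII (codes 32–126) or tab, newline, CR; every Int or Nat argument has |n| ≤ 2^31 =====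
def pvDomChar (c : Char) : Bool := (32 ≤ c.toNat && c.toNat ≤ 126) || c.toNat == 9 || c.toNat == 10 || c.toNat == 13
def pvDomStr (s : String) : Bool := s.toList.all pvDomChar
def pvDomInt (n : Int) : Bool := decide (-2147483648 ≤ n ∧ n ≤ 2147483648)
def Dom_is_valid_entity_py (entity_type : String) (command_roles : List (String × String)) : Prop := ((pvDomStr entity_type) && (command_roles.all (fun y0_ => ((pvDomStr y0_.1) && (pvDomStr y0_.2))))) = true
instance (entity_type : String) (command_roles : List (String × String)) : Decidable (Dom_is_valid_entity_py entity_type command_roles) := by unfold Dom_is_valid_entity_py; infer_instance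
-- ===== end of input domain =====

-- B replaces A's hardcoded if/elif boolean branches with a declarative DNF rules table
-- evaluated by one generic any/all interpreter; alternative decomposition, same cost.

-- ===== PORT A =====
-- literal transliteration of the if/elif chain; 'k in command_roles' is key membership,
-- any(role.startswith(p) for role in command_roles) iterates the keys.
def is_valid_entity_py (entity_type : String) (command_roles : List (String × String)) : Bool :=
  if entity_type == "light" then
    let has_on_off := command_roles.any (fun p => p.1 == "turn_on") && command_roles.any (fun p => p.1 == "turn_off")
    let has_toggle := command_roles.any (fun p => p.1 == "toggle")
    has_on_off || has_toggle
  else if entity_type == "fan" then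
    let has_off := command_roles.any (fun p => p.1 == "turn_off")
    let has_speeds := command_roles.any (fun p => PySem.Str.startswith p.1 "speed")
    has_off || has_speeds
  else if entity_type == "switch" then
    let has_on_off := command_roles.any (fun p => p.1 == "turn_on") && command_roles.any (fun p => p.1 == "turn_off")
    let has_toggle := command_roles.any (fun p => p.1 == "toggle")
    has_on_off || has_toggle
  else if entity_type == "media_player" then
    let has_power := command_roles.any (fun p => p.1 == "power") || (command_roles.any (fun p => p.1 == "turn_on") && command_roles.any (fun p => p.1 == "turn_off"))
    let has_volume := command_roles.any (fun p => p.1 == "volume_up") || command_roles.any (fun p => p.1 == "volume_down")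
    has_power || has_volume
  else if entity_type == "climate" then
    let has_on_off := command_roles.any (fun p => p.1 == "turn_on") && command_roles.any (fun p => p.1 == "turn_off")
    let has_temps := command_roles.any (fun p => PySem.Str.startswith p.1 "temperature_")
    let has_temp_control := command_roles.any (fun p => p.1 == "temperature_up") || command_roles.any (fun p => p.1 == "temperature_down")
    let has_hvac_modes := command_roles.any (fun p => PySem.Str.startswith p.1 "hvac_mode_")
    has_on_off || has_temps || has_temp_control || has_hvac_modes
  else if entity_type == "cover" then
    let has_open := command_roles.any (fun p => p.1 == "open")
    let has_close := command_roles.any (fun p => p.1 == "close")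
    let has_stop := command_roles.any (fun p => p.1 == "stop")
    let has_positions := command_roles.any (fun p => PySem.Str.startswith p.1 "position_")
    has_open || has_close || has_stop || has_positions
  else
    false

-- ===== PORT B =====
-- rules table: entity type ↦ DNF list of alternatives, each a list of ("key"/"prefix", string) requirements
def pvRules : PySem.Dict String (List (List (String × String))) :=
  PySem.Dict.mk
    [ ("light", [[("key", "turn_on"), ("key", "turn_off")], [("key", "toggle")]])
    , ("switch", [[("key", "turn_on"), ("key", "turn_off")], [("key", "toggle")]])
    , ("fan", [[("key", "turn_off")], [("prefix", "speed")]])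
    , ("media_player", [[("key", "power")], [("key", "turn_on"), ("key", "turn_off")],
                        [("key", "volume_up")], [("key", "volume_down")]])
    , ("climate", [[("key", "turn_on"), ("key", "turn_off")], [("prefix", "temperature_")],
                   [("key", "temperature_up")], [("key", "temperature_down")],
                   [("prefix", "hvac_mode_")]])
    , ("cover", [[("key", "open")], [("key", "close")], [("key", "stop")],
                 [("prefix", "position_")]]) ]

def pvHolds (req : String × String) (command_roles : List (String × String)) : Bool :=
  if req.1 == "key" then
    command_roles.any (fun p => p.1 == req.2)
  else
    command_roles.any (fun p => PySem.Str.startswith p.1 req.2)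

def is_valid_entity_py_alt (entity_type : String) (command_roles : List (String × String)) : Bool :=
  let alternatives := pvRules.getD entity_type []
  alternatives.any (fun alt => alt.all (fun req => pvHolds req command_roles))

-- ===== PRECONDITION & SPEC =====
def Spec_is_valid_entity_py (entity_type : String) (command_roles : List (String × String)) (out : Bool) : Prop := out = is_valid_entity_py_alt entity_type command_roles
instance (entity_type : String) (command_roles : List (String × String)) (out : Bool) : Decidable (Spec_is_valid_entity_py entity_type command_roles out) := by unfold Spec_is_valid_entity_py; infer_instance

-- ===== CLAIM =====
def Claim_equal_is_valid_entity_py : Prop := ∀ (entity_type : String) (command_roles : List (String × String)), Dom_is_valid_entity_py entity_type command_roles → Spec_is_valid_entity_py entity_type command_roles (is_valid_entity_py entity_type command_roles)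

-- ===== LEMMAS AND PROOFS =====

-- ===== VERDICT =====
theorem is_valid_entity_py_spec : Claim_equal_is_valid_entity_py := by
  intro et cr _
  unfold Spec_is_valid_entity_py is_valid_entity_py is_valid_entity_py_alt
  by_cases h1 : et = "light"
  · subst h1; simp [pvRules, PySem.Dict.getD, PySem.Dict.get?, pvHolds]
  by_cases h2 : et = "fan"
  · subst h2; simp [pvRules, PySem.Dict.getD, PySem.Dict.get?, pvHolds]
  by_cases h3 : et = "switch"
  · subst h3; simp [pvRules, PySem.Dict.getD, PySem.Dict.get?, pvHolds]
  by_cases h4 : et = "media_player"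
  · subst h4; simp [pvRules, PySem.Dict.getD, PySem.Dict.get?, pvHolds, Bool.or_assoc]
  by_cases h5 : et = "climate"
  · subst h5; simp [pvRules, PySem.Dict.getD, PySem.Dict.get?, pvHolds, Bool.or_assoc]
  by_cases h6 : et = "cover"
  · subst h6; simp [pvRules, PySem.Dict.getD, PySem.Dict.get?, pvHolds, Bool.or_assoc]
  simp [pvRules, beq_iff_eq, PySem.Dict.getD, PySem.Dict.get?,
    h1, h2, h3, h4, h5, h6, Ne.symm h1, Ne.symm h2, Ne.symm h3, Ne.symm h4, Ne.symm h5, Ne.symm h6]
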